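-- pv_equiv track=rewrite | github.com/CDBiddulph/scaffold-learning | experiments/keep_crosswords_20250711_195402/scaffolds/1-7/scaffold.py | format_puzzle_for_llm
-- ===== SOURCE A (Python) =====
-- def format_puzzle_for_llm(grid, across_clues, down_clues):
--     """Format the puzzle in a clear way for the LLM"""
--     result = []
--
--     # Add grid with numbering
--     height = len(grid)
--     width = len(grid[0]) if height > 0 else 0
--
--     # Calculate clue numbers
--     clue_positions = {}
--     current_num = 1
--
--     for row in range(height):
--         for col in range(width):
--             if grid[row][col] == '.':
--                 continue
--
--             starts_across = (
--                 (col == 0 or grid[row][col - 1] == '.')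
--                 and col + 1 < width
--                 and grid[row][col + 1] != '.'
--             )
--             starts_down = (
--                 (row == 0 or grid[row - 1][col] == '.')
--                 and row + 1 < height
--                 and grid[row + 1][col] != '.'
--             )
--
--             if starts_across or starts_down:
--                 clue_positions[(row, col)] = current_num
--                 current_num += 1
--
--     # Show grid with numbers
--     result.append("Grid (- = empty cell, . = black square, numbers show clue start positions):")
--     for row in range(height):
--         row_display = []
--         for col in range(width):
--             if grid[row][col] == '.':
--                 row_display.append('.')
--             elif (row, col) in clue_positions:
--                 row_display.append(str(clue_positions[(row, col)]))
--             else: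
--                 row_display.append('-')
--         result.append(' '.join(row_display))
--
--     result.append("")
--
--     # Add clues
--     result.append("Across:")
--     for num in sorted(across_clues.keys()):
--         result.append(f"  {num}. {across_clues[num]}")
--
--     result.append("")
--     result.append("Down:")
--     for num in sorted(down_clues.keys()):
--         result.append(f"  {num}. {down_clues[num]}")
--
--     return '\n'.join(result)
-- ===== SOURCE B (Python) =====
-- def format_puzzle_for_llm(grid, across_clues, down_clues):
--     """Format the puzzle in a clear way for the LLM (single fused grid pass)."""
--     height = len(grid)
--     width = len(grid[0]) if height > 0 else 0
--
--     result = ["Grid (- = empty cell, . = black square, numbers show clue start positions):"]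
--     current_num = 1
--     # One row-major pass: number clue starts and build each display row at once.
--     for row in range(height):
--         row_display = []
--         for col in range(width):
--             if grid[row][col] == '.':
--                 row_display.append('.')
--                 continue
--             starts_across = (
--                 (col == 0 or grid[row][col - 1] == '.')
--                 and col + 1 < width
--                 and grid[row][col + 1] != '.'
--             )
--             starts_down = (
--                 (row == 0 or grid[row - 1][col] == '.')
--                 and row + 1 < height
--                 and grid[row + 1][col] != '.'
--             )
--             if starts_across or starts_down:
--                 row_display.append(str(current_num))
--                 current_num += 1
--             else:
--                 row_display.append('-')
--         result.append(' '.join(row_display))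
--
--     result.append("")
--     result.append("Across:")
--     for num in sorted(across_clues.keys()):
--         result.append(f"  {num}. {across_clues[num]}")
--
--     result.append("")
--     result.append("Down:")
--     for num in sorted(down_clues.keys()):
--         result.append(f"  {num}. {down_clues[num]}")
--
--     return '\n'.join(result)
-- ===== Notes on version B (the rewrite author's own statement) =====
-- stated objective: simpler
-- what changed: B fuses A's two grid traversals into one row-major pass that numbers clue starts and emits each display row simultaneously, eliminating the clue_positions dict and the second lookup scan; the clue sections are unchanged.
import Mathlib
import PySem

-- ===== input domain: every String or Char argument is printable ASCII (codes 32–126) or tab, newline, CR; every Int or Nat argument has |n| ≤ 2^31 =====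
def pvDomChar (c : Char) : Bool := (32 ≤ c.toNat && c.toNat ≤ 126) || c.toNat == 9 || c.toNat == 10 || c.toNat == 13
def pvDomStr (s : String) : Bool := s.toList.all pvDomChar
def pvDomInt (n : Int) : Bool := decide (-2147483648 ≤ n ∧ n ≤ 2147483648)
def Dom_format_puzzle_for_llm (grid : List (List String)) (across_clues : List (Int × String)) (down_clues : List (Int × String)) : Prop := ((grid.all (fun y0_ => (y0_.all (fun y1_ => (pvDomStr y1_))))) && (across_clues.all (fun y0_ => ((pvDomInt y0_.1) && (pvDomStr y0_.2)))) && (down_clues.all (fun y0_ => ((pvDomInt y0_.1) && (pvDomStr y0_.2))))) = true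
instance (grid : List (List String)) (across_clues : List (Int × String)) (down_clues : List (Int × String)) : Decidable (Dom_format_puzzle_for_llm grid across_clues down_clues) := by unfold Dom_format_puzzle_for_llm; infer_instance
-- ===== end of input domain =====

-- B fuses A's two grid traversals into one pass that numbers clue starts and builds each
-- display row at the same time, dropping the clue_positions dict (objective: simpler).

-- ===== PORT A =====
-- grid[r][c] (both ports index the same way; inside Pre_ every access is in range)
def pvCell (grid : List (List String)) (r c : Int) : String :=
  PySem.List.pyGetD (PySem.List.pyGetD grid r []) c ""

def pvStartsAcross (grid : List (List String)) (width r c : Int) : Bool :=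
  (c == 0 || pvCell grid r (c - 1) == ".") && decide (c + 1 < width) && (pvCell grid r (c + 1) != ".")

def pvStartsDown (grid : List (List String)) (height r c : Int) : Bool :=
  (r == 0 || pvCell grid (r - 1) c == ".") && decide (r + 1 < height) && (pvCell grid (r + 1) c != ".")

-- body of A's first (numbering) loop
def pvStepA (grid : List (List String)) (h w : Int) (st : PySem.Dict (Int × Int) Int × Int) (r c : Int) : PySem.Dict (Int × Int) Int × Int :=
  if pvCell grid r c == "." then st
  else if pvStartsAcross grid w r c || pvStartsDown grid h r c then (st.1.insert (r, c) st.2, st.2 + 1)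
  else st

-- A's first nested loop: builds clue_positions and current_num
def pvPassA (grid : List (List String)) (h w : Int) (st : PySem.Dict (Int × Int) Int × Int) (rows : List Int) : PySem.Dict (Int × Int) Int × Int :=
  rows.foldl (fun st r => (PySem.List.pyRange 0 w 1).foldl (fun st c => pvStepA grid h w st r c) st) st

-- the body of A's second (display) loop
def pvCellDisp (grid : List (List String)) (d : PySem.Dict (Int × Int) Int) (r c : Int) : String :=
  if pvCell grid r c == "." then "."
  else if d.contains (r, c) then PySem.Int.toStr (d.getD (r, c) 0)
  else "-"

-- the clue loops (textually identical in A and in B)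
def pvClueLines (cl : List (Int × String)) (acc : List String) : List String :=
  let d := PySem.Dict.ofList cl
  (PySem.List.sorted d.keys (fun k => k) false).foldl
    (fun res n => res ++ ["  " ++ PySem.Int.toStr n ++ ". " ++ d.getD n ""]) acc

def format_puzzle_for_llm (grid : List (List String)) (across_clues : List (Int × String)) (down_clues : List (Int × String)) : String :=
  let height : Int := (grid.length : Int)
  let width : Int := if 0 < height then ((PySem.List.pyGetD grid 0 []).length : Int) else 0
  let cluePositions := (pvPassA grid height width (PySem.Dict.empty, 1) (PySem.List.pyRange 0 height 1)).1
  let result : List String := ["Grid (- = empty cell, . = black square, numbers show clue start positions):"]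
  let result := (PySem.List.pyRange 0 height 1).foldl
    (fun res r => res ++ [PySem.Str.join " "
      ((PySem.List.pyRange 0 width 1).foldl (fun rd c => rd ++ [pvCellDisp grid cluePositions r c]) [])]) result
  let result := result ++ ["", "Across:"]
  let result := pvClueLines across_clues result
  let result := result ++ ["", "Down:"]
  let result := pvClueLines down_clues result
  PySem.Str.join "\n" result

-- ===== PORT B =====
-- body of B's single fused loop: appends the display cell and advances the counter
def pvStepB (grid : List (List String)) (h w r : Int) (st : List String × Int) (c : Int) : List String × Int :=
  if pvCell grid r c == "." then (st.1 ++ ["."], st.2)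
  else if pvStartsAcross grid w r c || pvStartsDown grid h r c then (st.1 ++ [PySem.Int.toStr st.2], st.2 + 1)
  else (st.1 ++ ["-"], st.2)

-- B's inner loop over one row: (row_display, current_num)
def pvRowB (grid : List (List String)) (h w r : Int) (n : Int) : List String × Int :=
  (PySem.List.pyRange 0 w 1).foldl (pvStepB grid h w r) ([], n)

-- B's outer loop: (result lines so far, current_num)
def pvPassB (grid : List (List String)) (h w : Int) (st : List String × Int) (rows : List Int) : List String × Int :=
  rows.foldl (fun st r =>
    let p := pvRowB grid h w r st.2
    (st.1 ++ [PySem.Str.join " " p.1], p.2)) st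

def format_puzzle_for_llm_alt (grid : List (List String)) (across_clues : List (Int × String)) (down_clues : List (Int × String)) : String :=
  let height : Int := (grid.length : Int)
  let width : Int := if 0 < height then ((PySem.List.pyGetD grid 0 []).length : Int) else 0
  let result := (pvPassB grid height width
    (["Grid (- = empty cell, . = black square, numbers show clue start positions):"], 1)
    (PySem.List.pyRange 0 height 1)).1
  let result := result ++ ["", "Across:"]
  let result := pvClueLines across_clues result
  let result := result ++ ["", "Down:"]
  let result := pvClueLines down_clues result
  PySem.Str.join "\n" result

-- ===== PRECONDITION & SPEC =====
-- Pre_ excludes exactly the inputs where Python A raises IndexError: a grid with some row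
-- shorter than row 0 (every cell grid[row][col], col < len(grid[0]), is indexed).
def Pre_format_puzzle_for_llm (grid : List (List String)) (across_clues : List (Int × String)) (down_clues : List (Int × String)) : Prop :=
  ∀ row ∈ grid, (grid.headD []).length ≤ row.length
instance (grid : List (List String)) (across_clues : List (Int × String)) (down_clues : List (Int × String)) : Decidable (Pre_format_puzzle_for_llm grid across_clues down_clues) := by unfold Pre_format_puzzle_for_llm; infer_instance

def pvWitness_format_puzzle_for_llm : List (List String) × (List (Int × String)) × (List (Int × String)) :=
  ([["A", "B"], [".", "C"]], [(1, "first across")], [(2, "a down clue")])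

def Spec_format_puzzle_for_llm (grid : List (List String)) (across_clues : List (Int × String)) (down_clues : List (Int × String)) (out : String) : Prop := out = format_puzzle_for_llm_alt grid across_clues down_clues
instance (grid : List (List String)) (across_clues : List (Int × String)) (down_clues : List (Int × String)) (out : String) : Decidable (Spec_format_puzzle_for_llm grid across_clues down_clues out) := by unfold Spec_format_puzzle_for_llm; infer_instance

-- ===== CLAIM (what is proved, stated in full; the proofs are below) =====
def Claim_equal_format_puzzle_for_llm : Prop := ∀ (grid : List (List String)) (across_clues : List (Int × String)) (down_clues : List (Int × String)), Dom_format_puzzle_for_llm grid across_clues down_clues → Pre_format_puzzle_for_llm grid across_clues down_clues → Spec_format_puzzle_for_llm grid across_clues down_clues (format_puzzle_for_llm grid across_clues down_clues)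

-- ===== LEMMAS AND PROOFS =====

-- One row: A's numbering fold and B's fused fold agree; F1 is a frame condition on the dict,
-- F2 says B's row equals A's display of the row under any dict D agreeing with the row's final dict.
theorem pv_rowAB (grid : List (List String)) (h w r : Int) :
    ∀ (cs : List Int), cs.Nodup →
    ∀ (d : PySem.Dict (Int × Int) Int) (n : Int) (rd : List String),
    (∀ c ∈ cs, d.get? (r, c) = none) →
    (∀ k : Int × Int, (k.1 ≠ r ∨ k.2 ∉ cs) →
       (cs.foldl (fun st c => pvStepA grid h w st r c) (d, n)).1.get? k = d.get? k)
    ∧ (∀ D : PySem.Dict (Int × Int) Int,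
        (∀ c ∈ cs, D.get? (r, c) = (cs.foldl (fun st c => pvStepA grid h w st r c) (d, n)).1.get? (r, c)) →
        cs.foldl (pvStepB grid h w r) (rd, n)
          = (rd ++ cs.map (fun c => pvCellDisp grid D r c),
             (cs.foldl (fun st c => pvStepA grid h w st r c) (d, n)).2)) := by
  intro cs
  induction cs with
  | nil =>
    intro _ d n rd _
    exact ⟨fun k _ => rfl, fun D _ => by simp⟩
  | cons c cs ih =>
    intro hnd d n rd H
    obtain ⟨hc, hnd'⟩ := List.nodup_cons.mp hnd
    by_cases hdot : pvCell grid r c == "."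
    · -- black square: both states pass through
      have eA : pvStepA grid h w (d, n) r c = (d, n) := by simp [pvStepA, hdot]
      have eB : pvStepB grid h w r (rd, n) c = (rd ++ ["."], n) := by simp [pvStepB, hdot]
      obtain ⟨F1, F2⟩ := ih hnd' d n (rd ++ ["."]) (fun c' h' => H c' (List.mem_cons_of_mem _ h'))
      simp only [List.foldl_cons, eA, eB]
      refine ⟨fun k hk => F1 k ?_, fun D hD => ?_⟩
      · rcases hk with h | h
        · exact Or.inl h
        · exact Or.inr (fun hm => h (List.mem_cons_of_mem _ hm))
      · rw [F2 D (fun c' h' => hD c' (List.mem_cons_of_mem _ h'))]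
        have hde : pvCell grid r c = "." := eq_of_beq hdot
        simp [pvCellDisp, hde]
    · have hdf : (pvCell grid r c == ".") = false := by
        cases hx : (pvCell grid r c == ".") with
        | false => rfl
        | true => exact absurd hx hdot
      have hdne : pvCell grid r c ≠ "." := by simpa using hdf
      by_cases hst : (pvStartsAcross grid w r c || pvStartsDown grid h r c)
      · -- a clue start: A inserts, B emits the number; both bump the counter
        have eA : pvStepA grid h w (d, n) r c = (d.insert (r, c) n, n + 1) := by
          simp [pvStepA, hdf, hst]
        have eB : pvStepB grid h w r (rd, n) c = (rd ++ [PySem.Int.toStr n], n + 1) := by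
          simp [pvStepB, hdf, hst]
        have H' : ∀ c' ∈ cs, (d.insert (r, c) n).get? (r, c') = none := by
          intro c' h'
          have hne : ((r, c') : Int × Int) ≠ (r, c) :=
            fun e => hc (((Prod.mk.injEq _ _ _ _).mp e).2 ▸ h')
          rw [PySem.Dict.get?_insert_of_ne _ _ hne]
          exact H c' (List.mem_cons_of_mem _ h')
        obtain ⟨F1, F2⟩ := ih hnd' (d.insert (r, c) n) (n + 1) (rd ++ [PySem.Int.toStr n]) H'
        simp only [List.foldl_cons, eA, eB]
        refine ⟨fun k hk => ?_, fun D hD => ?_⟩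
        · have hk' : k.1 ≠ r ∨ k.2 ∉ cs := by
            rcases hk with h | h
            · exact Or.inl h
            · exact Or.inr (fun hm => h (List.mem_cons_of_mem _ hm))
          have hkne : k ≠ (r, c) := by
            rcases hk with h | h
            · intro e; exact h (by rw [e])
            · intro e; exact h (by rw [e]; exact List.mem_cons_self ..)
          rw [F1 k hk', PySem.Dict.get?_insert_of_ne _ _ hkne]
        · have hDc : D.get? (r, c) = some n := by
            rw [hD c (List.mem_cons_self ..), F1 (r, c) (Or.inr hc),
                PySem.Dict.get?_insert_self]
          have hcont : D.contains (r, c) = true := by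
            rw [PySem.Dict.contains_eq_isSome_get?, hDc]; rfl
          have hgetD : D.getD (r, c) 0 = n := by
            rw [PySem.Dict.getD_eq_get?_getD, hDc]; rfl
          rw [F2 D (fun c' h' => hD c' (List.mem_cons_of_mem _ h'))]
          simp [pvCellDisp, hdne, hcont, hgetD]
      · -- open cell, not a start: both emit '-'
        have hstf : (pvStartsAcross grid w r c || pvStartsDown grid h r c) = false := by
          cases hx : (pvStartsAcross grid w r c || pvStartsDown grid h r c) with
          | false => rfl
          | true => exact absurd hx hst
        have eA : pvStepA grid h w (d, n) r c = (d, n) := by simp [pvStepA, hdf, hstf]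
        have eB : pvStepB grid h w r (rd, n) c = (rd ++ ["-"], n) := by
          simp [pvStepB, hdf, hstf]
        obtain ⟨F1, F2⟩ := ih hnd' d n (rd ++ ["-"]) (fun c' h' => H c' (List.mem_cons_of_mem _ h'))
        simp only [List.foldl_cons, eA, eB]
        refine ⟨fun k hk => F1 k ?_, fun D hD => ?_⟩
        · rcases hk with h | h
          · exact Or.inl h
          · exact Or.inr (fun hm => h (List.mem_cons_of_mem _ hm))
        · have hDc : D.get? (r, c) = none := by
            rw [hD c (List.mem_cons_self ..), F1 (r, c) (Or.inr hc)]
            exact H c (List.mem_cons_self ..)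
          have hcont : D.contains (r, c) = false := by
            rw [PySem.Dict.contains_eq_isSome_get?, hDc]; rfl
          rw [F2 D (fun c' h' => hD c' (List.mem_cons_of_mem _ h'))]
          simp [pvCellDisp, hdne, hcont]


-- All rows: B's fused pass produces exactly A's display lines (with D the final dict) and the same counter.
theorem pv_passAB (grid : List (List String)) (h w : Int) :
    ∀ (rows : List Int), rows.Nodup →
    ∀ (d : PySem.Dict (Int × Int) Int) (n : Int) (acc : List String),
    (∀ r ∈ rows, ∀ c : Int, d.get? (r, c) = none) →
    (∀ k : Int × Int, k.1 ∉ rows → (pvPassA grid h w (d, n) rows).1.get? k = d.get? k)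
    ∧ (∀ D : PySem.Dict (Int × Int) Int,
        (∀ r ∈ rows, ∀ c : Int, D.get? (r, c) = (pvPassA grid h w (d, n) rows).1.get? (r, c)) →
        pvPassB grid h w (acc, n) rows
          = (acc ++ rows.map (fun r => PySem.Str.join " "
               ((PySem.List.pyRange 0 w 1).map (fun c => pvCellDisp grid D r c))),
             (pvPassA grid h w (d, n) rows).2)) := by
  intro rows
  induction rows with
  | nil =>
    intro _ d n acc _
    exact ⟨fun k _ => rfl, fun D _ => by simp [pvPassB, pvPassA]⟩
  | cons r rest ih =>
    intro hnd d n acc H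
    obtain ⟨hr, hnd'⟩ := List.nodup_cons.mp hnd
    obtain ⟨F1r, F2r⟩ := pv_rowAB grid h w r (PySem.List.pyRange 0 w 1)
      (PySem.List.nodup_pyRange_one 0 w) d n []
      (fun c _ => H r (List.mem_cons_self ..) c)
    rcases hst1 : (PySem.List.pyRange 0 w 1).foldl (fun st c => pvStepA grid h w st r c) (d, n)
      with ⟨d1, n1⟩
    rw [hst1] at F1r F2r
    have ePass : pvPassA grid h w (d, n) (r :: rest) = pvPassA grid h w (d1, n1) rest := by
      simp [pvPassA, List.foldl_cons, hst1]
    have H1 : ∀ r' ∈ rest, ∀ c : Int, d1.get? (r', c) = none := by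
      intro r' h' c
      have hne : r' ≠ r := fun e => hr (e ▸ h')
      have := F1r (r', c) (Or.inl hne)
      simp only at this
      rw [this]
      exact H r' (List.mem_cons_of_mem _ h') c
    obtain ⟨F1, F2⟩ := ih hnd' d1 n1 (acc ++ [PySem.Str.join " "
      ((PySem.List.pyRange 0 w 1).map (fun c => pvCellDisp grid d1 r c))]) H1
    constructor
    · intro k hk
      have hk1 : k.1 ∉ rest := fun hm => hk (List.mem_cons_of_mem _ hm)
      have hkr : k.1 ≠ r := fun e => hk (by rw [e]; exact List.mem_cons_self ..)
      rw [ePass, F1 k hk1]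
      exact F1r k (Or.inl hkr)
    · intro D hD
      have hrow : ∀ c ∈ PySem.List.pyRange 0 w 1, D.get? (r, c) = d1.get? (r, c) := by
        intro c _
        rw [hD r (List.mem_cons_self ..) c, ePass, F1 (r, c) hr]
      have hRowB : pvRowB grid h w r n
          = ((PySem.List.pyRange 0 w 1).map (fun c => pvCellDisp grid D r c), n1) := by
        have := F2r D hrow
        simp only at this
        simpa [pvRowB] using this
      have hDrest : ∀ r' ∈ rest, ∀ c : Int,
          D.get? (r', c) = (pvPassA grid h w (d1, n1) rest).1.get? (r', c) := by
        intro r' h' c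
        rw [hD r' (List.mem_cons_of_mem _ h') c, ePass]
      have hMapEq : (PySem.List.pyRange 0 w 1).map (fun c => pvCellDisp grid D r c)
          = (PySem.List.pyRange 0 w 1).map (fun c => pvCellDisp grid d1 r c) := by
        refine List.map_congr_left ?_
        intro c hcm
        simp [pvCellDisp, hrow c hcm, PySem.Dict.contains_eq_isSome_get?,
          PySem.Dict.getD_eq_get?_getD]
      have eStep : pvPassB grid h w (acc, n) (r :: rest)
          = pvPassB grid h w (acc ++ [PySem.Str.join " "
              ((PySem.List.pyRange 0 w 1).map (fun c => pvCellDisp grid d1 r c))], n1) rest := by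
        simp [pvPassB, List.foldl_cons, hRowB, hMapEq]
      rw [eStep, F2 D hDrest, ePass]
      simp [hMapEq]

-- The grid sections coincide: B's fused pass yields exactly A's display lines.
theorem pv_lines_eq (grid : List (List String)) (h w : Int) (hdr : List String) :
    (pvPassB grid h w (hdr, 1) (PySem.List.pyRange 0 h 1)).1
      = (PySem.List.pyRange 0 h 1).foldl
          (fun res r => res ++ [PySem.Str.join " "
            ((PySem.List.pyRange 0 w 1).foldl (fun rd c => rd ++ [pvCellDisp grid
              (pvPassA grid h w (PySem.Dict.empty, 1) (PySem.List.pyRange 0 h 1)).1 r c]) [])])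
          hdr := by
  obtain ⟨_, F2⟩ := pv_passAB grid h w (PySem.List.pyRange 0 h 1)
    (PySem.List.nodup_pyRange_one 0 h) PySem.Dict.empty 1 hdr
    (fun r _ c => PySem.Dict.get?_empty _)
  rw [F2 (pvPassA grid h w (PySem.Dict.empty, 1) (PySem.List.pyRange 0 h 1)).1
    (fun r _ c => rfl)]
  simp only [PySem.List.foldl_append_singleton_eq_map, List.nil_append]

-- ===== VERDICT (by name: the statement is the Claim_ definition above) =====
theorem format_puzzle_for_llm_spec : Claim_equal_format_puzzle_for_llm := by
  unfold Claim_equal_format_puzzle_for_llm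
  intro grid across_clues down_clues _ _
  unfold Spec_format_puzzle_for_llm
  simp only [format_puzzle_for_llm, format_puzzle_for_llm_alt]
  rw [pv_lines_eq]
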